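-- pv_equiv track=rewrite | github.com/justtherightsize/empo | src/emp_metrics/ed_load.py | get_progressive_chunks
-- ===== SOURCE A (Python) =====
-- from typing import Union, Tuple, Any, List, Dict
--
-- def get_progressive_chunks(dialog: List[str], system_message: str = None, user_key: str = "user",
--                            assistant_key: str = "assistant") -> List[List[Dict[str,str]]]:
--     """
--     Extract progressively longer chunks of a dialog. Return them in a chat template as in
--     https://huggingface.co/docs/transformers/main/en/chat_templating
--     @param dialog: List of ordered utterances. Author1: even indices
--     @param system_message: Prepends the message as a system prompt. Use for generation only.
--     @param user_key: key for the even idx prompts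
--     @param assistant_key: key for the odd idx prompts
--     @return: chunks of len 2..n in the chat template
--     """
--     assert len(dialog) >= 1, "Empty dialog."
--
--     chunks = []
--     for i in range(0, len(dialog)):
--         template = []
--         if system_message is not None:
--             template.append({"role": "system", "content": system_message})
--         for j in range(0, i+1):
--             template.append(
--                 {"role": user_key, "content": dialog[j]} if j % 2 == 0 else
--                 {"role": assistant_key, "content": dialog[j]})
--         chunks.append(template)
--     return chunks
-- ===== SOURCE B (Python) =====
-- def get_progressive_chunks(dialog, system_message=None, user_key="user",
--                            assistant_key="assistant"):
--     assert len(dialog) >= 1, "Empty dialog."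
--     template = [] if system_message is None else [{"role": "system", "content": system_message}]
--     chunks = []
--     for i, utterance in enumerate(dialog):
--         role = user_key if i % 2 == 0 else assistant_key
--         template = template + [{"role": role, "content": utterance}]
--         chunks.append(template)
--     return chunks
-- ===== Notes on version B (the rewrite author's own statement) =====
-- stated objective: simpler
-- what changed: B builds the growing template incrementally in a single enumerate pass, snapshotting it after each append, instead of A's nested loop that rebuilds every prefix from scratch.
import Mathlib
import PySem

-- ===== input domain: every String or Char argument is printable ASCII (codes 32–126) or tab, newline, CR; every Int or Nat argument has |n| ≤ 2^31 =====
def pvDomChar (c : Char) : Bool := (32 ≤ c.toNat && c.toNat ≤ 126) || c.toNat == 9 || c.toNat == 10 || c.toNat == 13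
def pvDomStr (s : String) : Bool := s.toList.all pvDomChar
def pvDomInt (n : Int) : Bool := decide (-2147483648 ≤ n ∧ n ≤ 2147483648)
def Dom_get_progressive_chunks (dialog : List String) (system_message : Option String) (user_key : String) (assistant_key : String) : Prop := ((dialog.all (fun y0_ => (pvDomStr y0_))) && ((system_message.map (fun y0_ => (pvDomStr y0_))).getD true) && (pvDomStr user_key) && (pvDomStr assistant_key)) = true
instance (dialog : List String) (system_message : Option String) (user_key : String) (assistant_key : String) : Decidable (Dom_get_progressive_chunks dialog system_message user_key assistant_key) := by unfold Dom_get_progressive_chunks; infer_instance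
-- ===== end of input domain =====

-- B replaces A's nested prefix-rebuilding loops by a single pass that grows one
-- template and snapshots it after each append (objective: simpler decomposition).


-- ===== PORT A =====
-- literal transliteration of A: for each i in range(len(dialog)) rebuild the whole
-- prefix template with an inner loop over j in range(i+1)
def get_progressive_chunks (dialog : List String) (system_message : Option String) (user_key : String) (assistant_key : String) : List (List (List (String × String))) :=
  (PySem.List.pyRange 0 (dialog.length : Int)).foldl (fun chunks i =>
    let template : List (List (String × String)) :=
      match system_message with
      | some m => [[("role", "system"), ("content", m)]]
      | none => []
    let template := (PySem.List.pyRange 0 (i + 1)).foldl (fun t j =>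
      t ++ [if PySem.Int.mod j 2 == 0
            then [("role", user_key), ("content", PySem.List.pyGetD dialog j "")]
            else [("role", assistant_key), ("content", PySem.List.pyGetD dialog j "")]]) template
    chunks ++ [template]) []

-- ===== PORT B =====
-- B's single pass: carry the growing template, append one message per utterance,
-- snapshot after each append
def pvAltGo (user_key assistant_key : String) : Nat → List (List (String × String)) → List String → List (List (List (String × String)))
  | _, _, [] => []
  | i, template, s :: rest =>
    let template' := template ++ [[("role", if i % 2 == 0 then user_key else assistant_key), ("content", s)]]
    template' :: pvAltGo user_key assistant_key (i + 1) template' rest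

def get_progressive_chunks_alt (dialog : List String) (system_message : Option String) (user_key : String) (assistant_key : String) : List (List (List (String × String))) :=
  let template : List (List (String × String)) :=
    match system_message with
    | none => []
    | some m => [[("role", "system"), ("content", m)]]
  pvAltGo user_key assistant_key 0 template dialog

-- ===== PRECONDITION & SPEC =====
-- Pre_ excludes the empty dialog, on which the Python A (and B) raise AssertionError.
def Pre_get_progressive_chunks (dialog : List String) (system_message : Option String) (user_key : String) (assistant_key : String) : Prop := dialog ≠ []
instance (dialog : List String) (system_message : Option String) (user_key : String) (assistant_key : String) : Decidable (Pre_get_progressive_chunks dialog system_message user_key assistant_key) := by unfold Pre_get_progressive_chunks; infer_instance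

def pvWitness_get_progressive_chunks : List String × Option String × String × String := (["hi", "there"], some "sys", "user", "assistant")

def Spec_get_progressive_chunks (dialog : List String) (system_message : Option String) (user_key : String) (assistant_key : String) (out : List (List (List (String × String)))) : Prop := out = get_progressive_chunks_alt dialog system_message user_key assistant_key
instance (dialog : List String) (system_message : Option String) (user_key : String) (assistant_key : String) (out : List (List (List (String × String)))) : Decidable (Spec_get_progressive_chunks dialog system_message user_key assistant_key out) := by unfold Spec_get_progressive_chunks; infer_instance

-- ===== CLAIM (what is proved, stated in full; the proofs are below) =====
def Claim_equal_get_progressive_chunks : Prop := ∀ (dialog : List String) (system_message : Option String) (user_key : String) (assistant_key : String), Dom_get_progressive_chunks dialog system_message user_key assistant_key → Pre_get_progressive_chunks dialog system_message user_key assistant_key → Spec_get_progressive_chunks dialog system_message user_key assistant_key (get_progressive_chunks dialog system_message user_key assistant_key)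

-- ===== LEMMAS AND PROOFS =====

-- the message for utterance number i
def pvMsg (u a : String) (i : Nat) (s : String) : List (String × String) :=
  [("role", if i % 2 == 0 then u else a), ("content", s)]

-- all messages of a dialog suffix, starting at index `start`
def pvMsgs (u a : String) : Nat → List String → List (List (String × String))
  | _, [] => []
  | i, s :: rest => pvMsg u a i s :: pvMsgs u a (i + 1) rest

-- B's pass yields, for each k < l.length, the snapshot tmpl ++ first (k+1) messages
theorem pvAltGo_eq (u a : String) (l : List String) : ∀ (i : Nat) (tmpl : List (List (String × String))),
    pvAltGo u a i tmpl l = (List.range l.length).map (fun k => tmpl ++ (pvMsgs u a i l).take (k + 1)) := by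
  induction l with
  | nil => intro i tmpl; simp [pvAltGo, pvMsgs]
  | cons s rest ih =>
    intro i tmpl
    simp only [pvAltGo, pvMsgs, List.length_cons, List.range_succ_eq_map, List.map_cons,
      List.map_map, List.take_succ_cons, ih]
    refine List.cons_eq_cons.mpr ⟨?_, ?_⟩
    · simp [pvMsg]
    · apply List.map_congr_left
      intro k _
      simp [Function.comp, List.append_assoc, pvMsg]

-- range-indexed prefix of the messages list
theorem pvMsgs_take (u a : String) (l : List String) : ∀ (m start : Nat), m ≤ l.length →
    (List.range m).map (fun j => pvMsg u a (start + j) (l.getD j "")) = (pvMsgs u a start l).take m := by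
  induction l with
  | nil =>
    intro m start hm
    have : m = 0 := Nat.le_zero.mp (by simpa using hm)
    subst this; simp
  | cons s rest ih =>
    intro m start hm
    cases m with
    | zero => simp
    | succ m' =>
      simp only [List.range_succ_eq_map, List.map_cons, List.map_map, pvMsgs, List.take_succ_cons]
      refine List.cons_eq_cons.mpr ⟨?_, ?_⟩
      · simp
      · rw [← ih m' (start + 1) (by simpa using hm)]
        apply List.map_congr_left
        intro k _
        simp [Function.comp, Nat.add_assoc, Nat.add_comm 1 k]

-- A's inner loop for a given i builds base ++ first (i+1) messages
theorem pvInner_eq (dialog : List String) (u a : String)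
    (base : List (List (String × String))) (i : Nat) (hi : i < dialog.length) :
    (PySem.List.pyRange 0 ((i : Int) + 1)).foldl (fun t j =>
      t ++ [if PySem.Int.mod j 2 == 0
            then [("role", u), ("content", PySem.List.pyGetD dialog j "")]
            else [("role", a), ("content", PySem.List.pyGetD dialog j "")]]) base
    = base ++ (pvMsgs u a 0 dialog).take (i + 1) := by
  rw [PySem.List.foldl_append_singleton_eq_map]
  have hcast : ((i : Int) + 1) = ((i + 1 : Nat) : Int) := by push_cast; ring
  rw [hcast, PySem.List.pyRange_zero_natCast, List.map_map]
  rw [← pvMsgs_take u a dialog (i + 1) 0 (by omega)]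
  apply congrArg
  apply List.map_congr_left
  intro j _
  simp only [Function.comp, PySem.List.pyGetD_natCast, pvMsg, Nat.zero_add]
  by_cases h : j % 2 = 0 <;> simp [h] <;> intro hx <;> exfalso <;> omega

theorem ports_eq (dialog : List String) (system_message : Option String) (u a : String) :
    get_progressive_chunks dialog system_message u a = get_progressive_chunks_alt dialog system_message u a := by
  unfold get_progressive_chunks get_progressive_chunks_alt
  rw [PySem.List.foldl_append_singleton_eq_map, PySem.List.pyRange_zero_natCast, List.map_map,
    pvAltGo_eq]
  simp only [List.nil_append]
  apply List.map_congr_left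
  intro i hi
  simp only [Function.comp]
  rw [pvInner_eq dialog u a _ i (List.mem_range.mp hi)]
  cases system_message <;> rfl

-- ===== VERDICT (by name: the statement is the Claim_ definition above) =====
theorem get_progressive_chunks_spec : Claim_equal_get_progressive_chunks := by
  intro dialog system_message u a _ _
  unfold Spec_get_progressive_chunks
  exact ports_eq dialog system_message u a
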